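-- pv_equiv track=rewrite | github.com/lefarov/cp_playground | practice/meta/tunnels.py | getSecondsElapsed
-- ===== SOURCE A (Python) =====
-- from typing import List
--
-- def getSecondsElapsed(C: int, N: int, A: List[int], B: List[int], K: int) -> int:
--     # Write your code here
--     # ---[**]--[****]-----
--     # 10/6 * Sum S_tunnel
--     #
--     #
--     # K // Sum S_tunnel * C / Sum S_tunnel
--     # K % Sum S_tunnel
--     # -> A
--
--     tunnel_lengths = [end - start for start, end in zip(A, B)]
--     tunnel_total = sum(tunnel_lengths)
--
--     num_completed_circles = K // tunnel_total
--     total_tunnel_time = num_completed_circles * C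
--
--     remaining_tunnel_time = K % tunnel_total
--     tunnel_pairs = sorted(zip(A, B))
--
--     accumulated_tunnel_time = 0
--     for start, end in tunnel_pairs:
--         tunnel_length = end - start
--         if remaining_tunnel_time <= accumulated_tunnel_time + tunnel_length:
--             total_tunnel_time += start + (remaining_tunnel_time - accumulated_tunnel_time)
--             break
--
--         accumulated_tunnel_time += tunnel_length
--
--     return total_tunnel_time
-- ===== SOURCE B (Python) =====
-- def getSecondsElapsed(C, N, A, B, K):
--     # Selection-based: no sorting — repeatedly extract the minimum remaining
--     # tunnel and decrement the remaining in-tunnel time until it fits.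
--     pairs = list(zip(A, B))
--     total = sum(e - s for s, e in pairs)
--     elapsed = (K // total) * C
--     r = K % total
--     while pairs:
--         s, e = min(pairs)
--         pairs.remove((s, e))
--         if r <= e - s:
--             return elapsed + s + r
--         r -= e - s
--     return elapsed
-- ===== Notes on version B (the rewrite author's own statement) =====
-- stated objective: alternative
-- what changed: B never sorts and keeps no cumulative sum: it repeatedly extracts the minimum remaining (start,end) pair from the list and decrements the remaining in-tunnel time by that tunnel's length until the remainder fits inside the extracted tunnel, returning elapsed + start + remainder there.
import Mathlib
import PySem

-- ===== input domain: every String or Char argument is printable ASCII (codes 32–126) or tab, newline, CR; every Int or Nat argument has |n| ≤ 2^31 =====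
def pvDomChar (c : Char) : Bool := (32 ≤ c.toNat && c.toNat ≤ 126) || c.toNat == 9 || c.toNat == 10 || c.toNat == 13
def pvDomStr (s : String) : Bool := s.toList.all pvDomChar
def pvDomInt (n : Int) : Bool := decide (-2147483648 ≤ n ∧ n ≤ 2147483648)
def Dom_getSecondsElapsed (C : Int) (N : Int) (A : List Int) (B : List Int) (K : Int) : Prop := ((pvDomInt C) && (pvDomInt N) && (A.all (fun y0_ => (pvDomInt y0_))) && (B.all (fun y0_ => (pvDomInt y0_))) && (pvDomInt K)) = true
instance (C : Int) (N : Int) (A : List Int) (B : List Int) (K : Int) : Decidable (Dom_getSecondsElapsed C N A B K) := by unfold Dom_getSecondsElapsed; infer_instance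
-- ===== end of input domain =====

-- B drops the sort and the cumulative sum entirely: it repeatedly extracts the minimum
-- remaining pair and decrements the remainder instead (objective: alternative).

-- ===== PORT A =====
-- the for-loop of A: running accumulator, early break adds into the running total
def aLoop (rem : Int) (tt : Int) (acc : Int) : List (Int × Int) → Int
  | [] => tt
  | (s, e) :: rest =>
    let len := e - s
    if rem ≤ acc + len then tt + s + (rem - acc)
    else aLoop rem tt (acc + len) rest

def getSecondsElapsed (C : Int) (N : Int) (A : List Int) (B : List Int) (K : Int) : Int :=
  let tunnel_lengths := (A.zip B).map (fun p => p.2 - p.1)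
  let tunnel_total := tunnel_lengths.sum
  let num_completed_circles := PySem.Int.floordiv K tunnel_total
  let total_tunnel_time := num_completed_circles * C
  let remaining := PySem.Int.mod K tunnel_total
  -- Python's sorted(zip(A,B)) sorts tuples lexicographically = sorted2 with tuple key
  let tunnel_pairs := PySem.List.sorted2 (A.zip B) (fun p => p.1) (fun p => p.2) false
  aLoop remaining total_tunnel_time 0 tunnel_pairs

-- ===== PORT B =====
-- min2? is Python's min over tuples; this fact is needed for bLoop's termination.
theorem pvMin2_eq_minLex (l : List (Int × Int)) :
    PySem.List.min2? l (fun p => p.1) (fun p => p.2)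
      = PySem.List.min? l (fun p => (toLex p : Int ×ₗ Int)) := by
  unfold PySem.List.min2? PySem.List.min?
  congr 1
  funext acc x
  cases acc with
  | none => rfl
  | some m =>
    have : (decide (x.1 < m.1) || !decide (m.1 < x.1) && decide (x.2 < m.2))
        = decide ((toLex x : Int ×ₗ Int) < toLex m) := by
      rcases x with ⟨x1, x2⟩; rcases m with ⟨m1, m2⟩
      simp only [Prod.Lex.lt_iff, ofLex_toLex]
      rcases lt_trichotomy x1 m1 with h | h | h <;> simp [h, not_lt_of_gt] <;> omega
    simp [this]

theorem pvMin2_mem {l : List (Int × Int)} {m : Int × Int}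
    (h : PySem.List.min2? l (fun p => p.1) (fun p => p.2) = some m) : m ∈ l := by
  rw [pvMin2_eq_minLex] at h
  exact PySem.List.min?_mem h

-- B's while-loop: extract the minimum pair, test the remainder against its length,
-- otherwise decrement the remainder and drop that pair.  pairs.remove(m) with m known
-- present (it came from min) is exactly List.erase.
def bLoop (r : Int) (res : Int) (l : List (Int × Int)) : Int :=
  match h : PySem.List.min2? l (fun p => p.1) (fun p => p.2) with
  | none => res
  | some m =>
    if r ≤ m.2 - m.1 then res + m.1 + r
    else bLoop (r - (m.2 - m.1)) res (l.erase m)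
termination_by l.length
decreasing_by
  have hm := pvMin2_mem h
  have := List.length_erase_of_mem hm
  have : 1 ≤ l.length := List.length_pos_of_mem hm
  omega

def getSecondsElapsed_alt (C : Int) (N : Int) (A : List Int) (B : List Int) (K : Int) : Int :=
  let pairs := A.zip B
  let total := (pairs.map (fun p => p.2 - p.1)).sum
  let elapsed := PySem.Int.floordiv K total * C
  let r := PySem.Int.mod K total
  bLoop r elapsed pairs

-- ===== PRECONDITION & SPEC =====
-- Pre_ excludes exactly the inputs where the summed tunnel length is 0: there the
-- Python A (and B) raise ZeroDivisionError on K // tunnel_total.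
def Pre_getSecondsElapsed (C : Int) (N : Int) (A : List Int) (B : List Int) (K : Int) : Prop :=
  ((A.zip B).map (fun p => p.2 - p.1)).sum ≠ 0
instance (C : Int) (N : Int) (A : List Int) (B : List Int) (K : Int) : Decidable (Pre_getSecondsElapsed C N A B K) := by unfold Pre_getSecondsElapsed; infer_instance

def pvWitness_getSecondsElapsed : Int × Int × List Int × List Int × Int := (10, 2, [1, 5], [3, 7], 9)

def Spec_getSecondsElapsed (C : Int) (N : Int) (A : List Int) (B : List Int) (K : Int) (out : Int) : Prop := out = getSecondsElapsed_alt C N A B K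
instance (C : Int) (N : Int) (A : List Int) (B : List Int) (K : Int) (out : Int) : Decidable (Spec_getSecondsElapsed C N A B K out) := by unfold Spec_getSecondsElapsed; infer_instance

-- ===== CLAIM (what is proved, stated in full; the proofs are below) =====
def Claim_equal_getSecondsElapsed : Prop := ∀ (C : Int) (N : Int) (A : List Int) (B : List Int) (K : Int), Dom_getSecondsElapsed C N A B K → Pre_getSecondsElapsed C N A B K → Spec_getSecondsElapsed C N A B K (getSecondsElapsed C N A B K)

-- ===== LEMMAS AND PROOFS =====

-- A's lexicographic tuple sort is the PySem sort under the Lex linear order on pairs.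
theorem pvBefore_eq :
    (fun a b : Int × Int => decide (a.1 < b.1) || !decide (b.1 < a.1) && decide (a.2 < b.2))
      = (fun a b : Int × Int => decide ((toLex a : Int ×ₗ Int) < toLex b)) := by
  funext a b
  rcases a with ⟨a1, a2⟩; rcases b with ⟨b1, b2⟩
  simp only [Prod.Lex.lt_iff, ofLex_toLex]
  rcases lt_trichotomy a1 b1 with h | h | h <;> simp [h, not_lt_of_gt] <;> omega

theorem pvSorted2_eq_sortedLex (l : List (Int × Int)) :
    PySem.List.sorted2 l (fun p => p.1) (fun p => p.2) false
      = PySem.List.sorted l (fun p => (toLex p : Int ×ₗ Int)) false := by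
  unfold PySem.List.sorted2 PySem.List.sorted
  simp only [Bool.false_eq_true, if_false, pvBefore_eq]

-- selection step: the sorted list starts with the minimum, followed by the sort of the rest
theorem pvSelection {l : List (Int × Int)} {m : Int × Int}
    (hmin : PySem.List.min? l (fun p => (toLex p : Int ×ₗ Int)) = some m) :
    PySem.List.sorted l (fun p => (toLex p : Int ×ₗ Int)) false
      = m :: PySem.List.sorted (l.erase m) (fun p => (toLex p : Int ×ₗ Int)) false := by
  have hm : m ∈ l := PySem.List.min?_mem hmin
  apply PySem.List.eq_of_perm_of_pairwise_le_of_injective (fun p => (toLex p : Int ×ₗ Int))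
    (toLex.injective)
  · exact (PySem.List.sorted_perm l _ false).trans
      ((List.perm_cons_erase hm).trans
        (List.Perm.cons m (PySem.List.sorted_perm (l.erase m) _ false).symm))
  · exact PySem.List.sorted_pairwise l _
  · refine List.Pairwise.cons ?_ (PySem.List.sorted_pairwise (l.erase m) _)
    intro y hy
    exact PySem.List.min?_isMin hmin y (List.mem_of_mem_erase ((PySem.List.mem_sorted _ _ _ _).mp hy))

-- A's scan over the sorted pairs equals B's repeated min extraction, for any accumulator.
theorem pvLoop_eq (n : Nat) : ∀ (l : List (Int × Int)), l.length = n →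
    ∀ (r res acc : Int),
    aLoop r res acc (PySem.List.sorted2 l (fun p => p.1) (fun p => p.2) false)
      = bLoop (r - acc) res l := by
  induction n using Nat.strong_induction_on with
  | _ n ih =>
    intro l hlen r res acc
    rw [pvSorted2_eq_sortedLex, bLoop]
    rw [pvMin2_eq_minLex]
    match hmin : PySem.List.min? l (fun p => (toLex p : Int ×ₗ Int)) with
    | none =>
      have : l = [] := (PySem.List.min?_eq_none_iff _ _).mp hmin
      subst this
      simp [PySem.List.sorted, aLoop]
    | some m =>
      have hm : m ∈ l := PySem.List.min?_mem hmin
      rw [pvSelection hmin]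
      rcases m with ⟨s, e⟩
      simp only [aLoop]
      by_cases hc : r ≤ acc + (e - s)
      · have h2 : r - acc ≤ e - s := by omega
        rw [if_pos hc, if_pos h2]
      · have h2 : ¬ r - acc ≤ e - s := by omega
        rw [if_neg hc, if_neg h2]
        have hlt : (l.erase (s, e)).length < n := by
          have := List.length_erase_of_mem hm
          have := List.length_pos_of_mem hm
          omega
        have heq : r - acc - (e - s) = r - (acc + (e - s)) := by omega
        rw [heq, ← pvSorted2_eq_sortedLex,
          ih _ hlt (l.erase (s, e)) rfl r res (acc + (e - s))]

-- ===== VERDICT (by name: the statement is the Claim_ definition above) =====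
theorem getSecondsElapsed_spec : Claim_equal_getSecondsElapsed := by
  intro C N A B K _ _
  unfold Spec_getSecondsElapsed getSecondsElapsed getSecondsElapsed_alt
  have := pvLoop_eq (A.zip B).length (A.zip B) rfl
    (PySem.Int.mod K ((A.zip B).map (fun p => p.2 - p.1)).sum)
    (PySem.Int.floordiv K ((A.zip B).map (fun p => p.2 - p.1)).sum * C) 0
  simpa using this
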